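-- pv_equiv track=rewrite | github.com/pypi-data/pypi-mirror-382 | packages/monday-client/monday_client-0.1.87-py3-none-any.whl/monday/services/utils/fields.py | _extract_args_from_rest
-- ===== SOURCE A (Python) =====
-- def _extract_args_from_rest(rest_of_content: str) -> tuple[str, str]:
--     """Extract arguments from remaining content."""
--     args = ''
--     if rest_of_content.startswith('('):
--         paren_count = 1
--         i = 1
--         while i < len(rest_of_content) and paren_count > 0:
--             if rest_of_content[i] == '(':
--                 paren_count += 1
--             elif rest_of_content[i] == ')':
--                 paren_count -= 1
--             i += 1
--         args = rest_of_content[:i]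
--         rest_of_content = rest_of_content[i:].strip()
--     return args, rest_of_content
-- ===== SOURCE B (Python) =====
-- def _extract_args_from_rest(rest_of_content: str) -> tuple[str, str]:
--     """Extract arguments from remaining content."""
--     if not rest_of_content.startswith('('):
--         return '', rest_of_content
--     bal = []
--     b = 0
--     for c in rest_of_content:
--         b += (c == '(') - (c == ')')
--         bal.append(b)
--     i = next((k + 1 for k, v in enumerate(bal) if v == 0), len(rest_of_content))
--     return rest_of_content[:i], rest_of_content[i:].strip()
-- ===== Notes on version B (the rewrite author's own statement) =====
-- stated objective: alternative
-- what changed: Replaces the index-driven while loop that maintains a live parenthesis counter with a two-phase decomposition: build the full running-balance table in one pass, then find the first position where the balance returns to zero (defaulting to the string length when unbalanced).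
import Mathlib
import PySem

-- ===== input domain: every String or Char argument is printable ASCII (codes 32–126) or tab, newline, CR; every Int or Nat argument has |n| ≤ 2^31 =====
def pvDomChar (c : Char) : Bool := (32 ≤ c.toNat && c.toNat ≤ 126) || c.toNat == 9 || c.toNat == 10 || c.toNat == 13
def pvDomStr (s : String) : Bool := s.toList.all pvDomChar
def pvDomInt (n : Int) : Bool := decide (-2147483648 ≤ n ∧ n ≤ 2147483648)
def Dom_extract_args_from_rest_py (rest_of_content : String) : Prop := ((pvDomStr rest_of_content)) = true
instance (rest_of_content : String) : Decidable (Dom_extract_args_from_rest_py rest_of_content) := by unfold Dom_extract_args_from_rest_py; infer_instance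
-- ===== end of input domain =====

-- B replaces A's counter-maintaining while loop with a balance-table-then-find decomposition; alternative structure, same cost.

-- ===== PORT A =====
-- A's while loop: index i, live counter paren_count; s[i] is only read when i < len, so getD is exact there.
def extractLoopA (cs : List Char) (i : Nat) (pc : Int) : Nat :=
  if h : i < cs.length ∧ 0 < pc then
    let c := cs.getD i ' '
    let pc' := if c = '(' then pc + 1 else if c = ')' then pc - 1 else pc
    extractLoopA cs (i + 1) pc'
  else i
termination_by cs.length - i
decreasing_by omega

def extract_args_from_rest_py (rest_of_content : String) : String × String :=
  if PySem.Str.startswith rest_of_content "(" then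
    let i := extractLoopA rest_of_content.toList 1 1
    (PySem.Str.slice rest_of_content none (some (i : Int)),
     PySem.Str.strip (PySem.Str.slice rest_of_content (some (i : Int)) none))
  else ("", rest_of_content)

-- ===== PORT B =====
-- the running-balance table (Source B's for loop appending b after each delta)
def balListB (b : Int) : List Char → List Int
  | [] => []
  | c :: cs =>
    let b' := b + (if c = '(' then 1 else 0) - (if c = ')' then 1 else 0)
    b' :: balListB b' cs

-- next((k + 1 for k, v in enumerate(bal) if v == 0), default)
def findZeroB : List Int → Option Nat
  | [] => none
  | v :: vs => if v = 0 then some 1 else (findZeroB vs).map (· + 1)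

def extract_args_from_rest_py_alt (rest_of_content : String) : String × String :=
  if PySem.Str.startswith rest_of_content "(" then
    let bal := balListB 0 rest_of_content.toList
    let i := (findZeroB bal).getD rest_of_content.toList.length
    (PySem.Str.slice rest_of_content none (some (i : Int)),
     PySem.Str.strip (PySem.Str.slice rest_of_content (some (i : Int)) none))
  else ("", rest_of_content)

-- ===== PRECONDITION & SPEC =====
def Spec_extract_args_from_rest_py (rest_of_content : String) (out : String × String) : Prop := out = extract_args_from_rest_py_alt rest_of_content
instance (rest_of_content : String) (out : String × String) : Decidable (Spec_extract_args_from_rest_py rest_of_content out) := by unfold Spec_extract_args_from_rest_py; infer_instance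

-- ===== CLAIM (what is proved, stated in full; the proofs are below) =====
def Claim_equal_extract_args_from_rest_py : Prop := ∀ (rest_of_content : String), Dom_extract_args_from_rest_py rest_of_content → Spec_extract_args_from_rest_py rest_of_content (extract_args_from_rest_py rest_of_content)

-- ===== LEMMAS AND PROOFS =====

-- abstract "characters consumed until the balance first returns to 0" that both ports reduce to
def gAux : List Char → Int → Nat
  | [], _ => 0
  | c :: cs, pc =>
    if 0 < pc then
      1 + gAux cs (if c = '(' then pc + 1 else if c = ')' then pc - 1 else pc)
    else 0

theorem step_eq (pc : Int) (c : Char) :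
    pc + (if c = '(' then (1 : Int) else 0) - (if c = ')' then (1 : Int) else 0) =
    (if c = '(' then pc + 1 else if c = ')' then pc - 1 else pc) := by
  split_ifs <;> simp_all

theorem gAux_nonpos (cs : List Char) (pc : Int) (h : pc ≤ 0) : gAux cs pc = 0 := by
  cases cs with
  | nil => simp [gAux]
  | cons c cs => simp only [gAux, if_neg (by omega : ¬ 0 < pc)]

theorem loopA_eq (n : Nat) : ∀ (cs : List Char) (i : Nat) (pc : Int), n = cs.length - i →
    extractLoopA cs i pc = i + gAux (cs.drop i) pc := by
  induction n with
  | zero =>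
    intro cs i pc hn
    have hi : cs.length ≤ i := by omega
    rw [extractLoopA, dif_neg (by omega : ¬ (i < cs.length ∧ 0 < pc)),
      List.drop_eq_nil_of_le hi]
    simp [gAux]
  | succ n ih =>
    intro cs i pc hn
    rw [extractLoopA]
    by_cases hpc : 0 < pc
    · by_cases hi : i < cs.length
      · simp only [hi, hpc, and_self, dif_pos]
        have hdrop : cs.drop i = cs[i] :: cs.drop (i + 1) :=
          List.drop_eq_getElem_cons hi
        have hget : cs.getD i ' ' = cs[i] := List.getD_eq_getElem cs ' ' hi
        rw [ih cs (i + 1) _ (by omega), hdrop]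
        simp only [gAux, hpc, if_pos, hget]
        omega
      · rw [dif_neg (by omega : ¬ (i < cs.length ∧ 0 < pc)),
          List.drop_eq_nil_of_le (by omega)]
        simp [gAux]
    · rw [dif_neg (by omega : ¬ (i < cs.length ∧ 0 < pc)),
        gAux_nonpos _ _ (by omega)]
      omega

theorem findB_eq : ∀ (cs : List Char) (pc : Int), 0 < pc →
    (findZeroB (balListB pc cs)).getD cs.length = gAux cs pc := by
  intro cs
  induction cs with
  | nil => intro pc _; simp [balListB, findZeroB, gAux]
  | cons c cs ih =>
    intro pc hpc
    simp only [balListB, findZeroB, gAux, hpc, if_pos]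
    rw [step_eq]
    set b' := (if c = '(' then pc + 1 else if c = ')' then pc - 1 else pc) with hb'
    by_cases hz : b' = 0
    · simp [hz, gAux_nonpos cs 0 (by omega)]
    · have hb'pos : 0 < b' := by rw [hb'] at hz ⊢; split_ifs at * <;> omega
      have hIH := ih b' hb'pos
      simp only [hz, if_neg, not_false_iff]
      cases ho : findZeroB (balListB b' cs) with
      | none => simp [ho] at hIH; simp [List.length_cons, ← hIH]; omega
      | some k => simp [ho] at hIH; simp [hIH]; omega

-- ===== VERDICT (by name: the statement is the Claim_ definition above) =====
theorem extract_args_from_rest_py_spec : Claim_equal_extract_args_from_rest_py := by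
  intro s _
  unfold Spec_extract_args_from_rest_py
  unfold extract_args_from_rest_py extract_args_from_rest_py_alt
  by_cases h : PySem.Str.startswith s "(" = true
  · have hp : "(".toList <+: s.toList := by
      simp at h; exact (PySem.Chars.startswith_iff _ _).mp h
    obtain ⟨t, ht⟩ := hp
    have hlist : s.toList = '(' :: t := by
      simpa using ht.symm
    have hA : extractLoopA s.toList 1 1 = 1 + gAux t 1 := by
      rw [loopA_eq (s.toList.length - 1) s.toList 1 1 rfl, hlist]
      rfl
    have hB : (findZeroB (balListB 0 s.toList)).getD s.toList.length = 1 + gAux t 1 := by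
      rw [hlist]
      have e1 : balListB 0 ('(' :: t) = 1 :: balListB 1 t := by
        simp only [balListB, if_neg (show ('(' : Char) ≠ ')' from by decide)]
        norm_num
      rw [e1, findZeroB, if_neg (by norm_num : ¬ (1 : Int) = 0)]
      have hIH := findB_eq t 1 (by norm_num)
      cases ho : findZeroB (balListB 1 t) with
      | none => simp [ho] at hIH; simp [List.length_cons, ← hIH]; omega
      | some k => simp [ho] at hIH; simp [hIH]; omega
    simp only [h, if_true]
    rw [hA, hB]
  · have h' : PySem.Chars.startswith s.toList ['('] = false := by
      simpa using h
    simp [h']
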